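-- pv_equiv track=rewrite | github.com/DanielAlexander27/yyc-algorithm | matrix_operators.py | thetaOperator
-- ===== SOURCE A (Python) =====
-- from typing import List
--
-- def thetaOperator(matrixA: List[List[int]], matrixB: List[List[int]] = None, nTimes: int = 1) -> List[List[int]]:
--     result:List[List[int]] = []
--
--     # Si no se recibe un valor para la matriz B, esto quiere decir que el operador va a actuar sobre
--     # la misma matriz A.
--     if (matrixB is None):
--
--         if (nTimes == 1 ):
--             return matrixA
--
--         # Se debe restar una unidad ya que, si el usuario solicita 2 veces, el for se ejecutaria desde
--         # 0 a 2 (0, 1, 2). Por tal razon, se hace la resta.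
--         nTimes = nTimes - 1
--         matrixB = matrixA
--
--
--     for times in range(0, nTimes):
--
--         if (times != 0):
--             matrixA = result
--             result:List[List[int]] = []
--
--         for rowA in matrixA:
--
--             for rowB in matrixB:
--                 result.append([*rowA, *rowB])
--
--
--     return result
-- ===== SOURCE B (Python) =====
-- from itertools import product
-- from typing import List
--
-- def thetaOperator(matrixA: List[List[int]], matrixB: List[List[int]] = None, nTimes: int = 1) -> List[List[int]]:
--     if matrixB is None:
--         if nTimes == 1:
--             return matrixA
--         if nTimes < 1:
--             return []
--         mats = [matrixA] * nTimes
--     else: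
--         if nTimes < 1:
--             return []
--         mats = [matrixA] + [matrixB] * nTimes
--     return [[x for row in combo for x in row] for combo in product(*mats)]
-- ===== Notes on version B (the rewrite author's own statement) =====
-- stated objective: idiomatic
-- what changed: Replaces A's iterated rebuild-the-result loop (reassigning matrixA to the partial result each pass) with a single cartesian product over the list of matrices ([matrixA]+[matrixB]*nTimes, or nTimes copies of matrixA) and a flatten of each combination, via itertools.product.
import Mathlib
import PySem

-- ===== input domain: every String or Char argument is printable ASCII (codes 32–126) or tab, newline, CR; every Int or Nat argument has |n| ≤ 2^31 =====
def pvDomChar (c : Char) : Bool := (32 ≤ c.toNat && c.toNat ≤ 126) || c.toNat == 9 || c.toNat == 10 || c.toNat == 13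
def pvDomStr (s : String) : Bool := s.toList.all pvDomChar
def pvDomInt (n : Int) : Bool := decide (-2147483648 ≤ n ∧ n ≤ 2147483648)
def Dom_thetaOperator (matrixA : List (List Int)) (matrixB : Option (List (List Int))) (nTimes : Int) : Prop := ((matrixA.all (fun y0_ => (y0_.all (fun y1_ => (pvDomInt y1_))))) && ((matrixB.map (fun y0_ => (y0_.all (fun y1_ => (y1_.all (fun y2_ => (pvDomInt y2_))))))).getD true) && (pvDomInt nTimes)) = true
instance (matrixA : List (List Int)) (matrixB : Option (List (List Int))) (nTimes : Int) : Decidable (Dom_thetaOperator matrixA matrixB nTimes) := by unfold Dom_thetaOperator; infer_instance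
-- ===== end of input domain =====

-- B replaces A's iterated rebuild-the-result loop with one cartesian product over the list
-- of factor matrices followed by a flatten of each combination (idiomatic; same cost).


-- ===== PORT A =====
-- One pass of A's body: rebind (matrixA, result) when times != 0, then the two nested
-- appending loops over matrixA and matrixB.
def pvCrossStep (mB : List (List Int)) (st : List (List Int) × List (List Int)) (times : Int) :
    List (List Int) × List (List Int) :=
  let mA := if times ≠ 0 then st.2 else st.1
  let res0 := if times ≠ 0 then ([] : List (List Int)) else st.2
  (mA, mA.foldl (fun res rowA => mB.foldl (fun res rowB => res ++ [rowA ++ rowB]) res) res0)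

-- the 'for times in range(0, nTimes)' loop, returning result
def pvLoopA (mA mB : List (List Int)) (n : Int) : List (List Int) :=
  ((PySem.List.pyRange 0 n 1).foldl (pvCrossStep mB) (mA, ([] : List (List Int)))).2

def thetaOperator (matrixA : List (List Int)) (matrixB : Option (List (List Int))) (nTimes : Int) : List (List Int) :=
  match matrixB with
  | none => if nTimes = 1 then matrixA else pvLoopA matrixA matrixA (nTimes - 1)
  | some mB => pvLoopA matrixA mB nTimes

-- ===== PORT B =====
-- itertools.product over a list of matrices (leftmost varies slowest)
def pvProduct (ms : List (List (List Int))) : List (List (List Int)) :=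
  match ms with
  | [] => [[]]
  | m :: rest => m.flatMap (fun r => (pvProduct rest).map (fun c => r :: c))

def thetaOperator_alt (matrixA : List (List Int)) (matrixB : Option (List (List Int))) (nTimes : Int) : List (List Int) :=
  match matrixB with
  | none =>
    if nTimes = 1 then matrixA
    else if nTimes < 1 then []
    else (pvProduct (List.replicate nTimes.toNat matrixA)).map List.flatten
  | some mB =>
    if nTimes < 1 then []
    else (pvProduct (matrixA :: List.replicate nTimes.toNat mB)).map List.flatten

-- ===== PRECONDITION & SPEC =====
def Spec_thetaOperator (matrixA : List (List Int)) (matrixB : Option (List (List Int))) (nTimes : Int) (out : List (List Int)) : Prop := out = thetaOperator_alt matrixA matrixB nTimes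
instance (matrixA : List (List Int)) (matrixB : Option (List (List Int))) (nTimes : Int) (out : List (List Int)) : Decidable (Spec_thetaOperator matrixA matrixB nTimes out) := by unfold Spec_thetaOperator; infer_instance

-- ===== CLAIM (what is proved, stated in full; the proofs are below) =====
def Claim_equal_thetaOperator : Prop := ∀ (matrixA : List (List Int)) (matrixB : Option (List (List Int))) (nTimes : Int), Dom_thetaOperator matrixA matrixB nTimes → Spec_thetaOperator matrixA matrixB nTimes (thetaOperator matrixA matrixB nTimes)

-- ===== LEMMAS AND PROOFS =====

-- one cross step: every row of X extended by every row of mB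
def pvG (mB : List (List Int)) (X : List (List Int)) : List (List Int) :=
  X.flatMap (fun rA => mB.map (fun rB => rA ++ rB))

theorem pvFlattenSingleton {α β : Type} (f : α → β) (l : List α) :
    (l.map (fun x => [f x])).flatten = l.map f := by
  induction l with
  | nil => simp
  | cons a l ih => simp [ih]

theorem pvStepInv (mB : List (List Int)) (ts : List Int) (h : ∀ t ∈ ts, t ≠ 0) (a : List (List Int)) :
    ts.foldl (pvCrossStep mB) (a, pvG mB a) = ((pvG mB)^[ts.length] a, (pvG mB)^[ts.length + 1] a) := by
  induction ts generalizing a with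
  | nil => simp
  | cons t ts ih =>
    have ht : t ≠ 0 := h t (by simp)
    have h' : ∀ t ∈ ts, t ≠ 0 := fun t ht => h t (by simp [ht])
    simp only [List.foldl_cons]
    have hstep : pvCrossStep mB (a, pvG mB a) t = (pvG mB a, pvG mB (pvG mB a)) := by
      simp [pvCrossStep, ht, pvG, List.flatMap, pvFlattenSingleton]
    rw [hstep, ih h' (pvG mB a)]
    simp [Function.iterate_succ_apply, List.length_cons]

theorem pvLoopA_nonpos (mA mB : List (List Int)) (n : Int) (h : n ≤ 0) :
    pvLoopA mA mB n = [] := by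
  have hr : PySem.List.pyRange 0 n 1 = [] := by
    simp [PySem.List.pyRange_one]
    omega
  simp [pvLoopA, hr]

theorem pvLoopA_pos (mA mB : List (List Int)) (n : Int) (h : 1 ≤ n) :
    pvLoopA mA mB n = (pvG mB)^[n.toNat] mA := by
  have hc : PySem.List.pyRange 0 n 1 = 0 :: PySem.List.pyRange 1 n 1 :=
    PySem.List.pyRange_one_cons (by omega)
  have hne : ∀ t ∈ PySem.List.pyRange 1 n 1, t ≠ 0 := by
    intro t ht
    have := (PySem.List.mem_pyRange_one).mp ht
    omega
  have hlen : (PySem.List.pyRange 1 n 1).length = (n - 1).toNat := PySem.List.length_pyRange_one _ _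
  have h0 : pvCrossStep mB (mA, ([] : List (List Int))) 0 = (mA, pvG mB mA) := by
    simp [pvCrossStep, pvG, List.flatMap, pvFlattenSingleton]
  rw [pvLoopA, hc]
  simp only [List.foldl_cons, h0]
  rw [pvStepInv mB _ hne mA]
  simp only [hlen]
  have h1 : (n - 1).toNat + 1 = n.toNat := by omega
  rw [h1]

theorem pvFcons (a : List (List Int)) (ms : List (List (List Int))) :
    (pvProduct (a :: ms)).map List.flatten
      = a.flatMap (fun r => ((pvProduct ms).map List.flatten).map (fun c => r ++ c)) := by
  simp [pvProduct, List.map_flatMap, List.map_map, Function.comp_def]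

theorem pvProdSnoc (ms : List (List (List Int))) (m : List (List Int)) :
    (pvProduct (ms ++ [m])).map List.flatten = pvG m ((pvProduct ms).map List.flatten) := by
  induction ms with
  | nil =>
    simp [pvProduct, pvG, List.map_flatMap]
  | cons a as ih =>
    rw [List.cons_append, pvFcons, pvFcons, ih]
    simp [pvG, List.flatMap_assoc, List.flatMap_map, List.map_flatMap, List.map_map,
      Function.comp_def, List.append_assoc]

theorem pvProdRep (mB : List (List Int)) (k : Nat) (mA : List (List Int)) :
    (pvProduct (mA :: List.replicate k mB)).map List.flatten = (pvG mB)^[k] mA := by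
  induction k with
  | zero =>
    simp [pvProduct, List.flatMap, Function.comp_def, pvFlattenSingleton]
  | succ k ih =>
    rw [List.replicate_succ',
        show mA :: (List.replicate k mB ++ [mB]) = (mA :: List.replicate k mB) ++ [mB] from rfl,
        pvProdSnoc, ih, Function.iterate_succ_apply']

-- ===== VERDICT (by name: the statement is the Claim_ definition above) =====
theorem thetaOperator_spec : Claim_equal_thetaOperator := by
  intro mA mB n _
  unfold Spec_thetaOperator thetaOperator thetaOperator_alt
  cases mB with
  | some B =>
    show pvLoopA mA B n
      = if n < 1 then [] else (pvProduct (mA :: List.replicate n.toNat B)).map List.flatten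
    by_cases h : n < 1
    · rw [if_pos h, pvLoopA_nonpos mA B n (by omega)]
    · rw [if_neg h, pvLoopA_pos mA B n (by omega), pvProdRep]
  | none =>
    show (if n = 1 then mA else pvLoopA mA mA (n - 1))
      = if n = 1 then mA else if n < 1 then []
        else (pvProduct (List.replicate n.toNat mA)).map List.flatten
    by_cases h1 : n = 1
    · rw [if_pos h1, if_pos h1]
    · by_cases h : n < 1
      · rw [if_neg h1, if_neg h1, if_pos h, pvLoopA_nonpos mA mA (n - 1) (by omega)]
      · rw [if_neg h1, if_neg h1, if_neg h, pvLoopA_pos mA mA (n - 1) (by omega)]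
        have hrep : List.replicate n.toNat mA = mA :: List.replicate (n - 1).toNat mA := by
          have hn : n.toNat = (n - 1).toNat + 1 := by omega
          rw [hn, List.replicate_succ]
        rw [hrep, pvProdRep]
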